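-- pv_equiv track=rewrite | github.com/thanhnho417/python | Đỗ Quốc Triệu bài tập số học/GCDMAX.py | xuli
-- ===== SOURCE A (Python) =====
-- def GCD(a, b):
--     while b > 0:
--         a, b = b, a % b
--     return a
--
-- def xuli(A):
--     B = []
--     for i in A:
--         h = 0
--         for j in range(1,i):
--             for k in range(j+1,i+1):
--                 h = max(h,GCD(j,k))
--         B.append(h)
--     return B
-- ===== SOURCE B (Python) =====
-- def xuli(A):
--     # max gcd over pairs 1<=j<k<=i is floor(i/2) when i>=2 (pair (m,2m) with m=i//2), else 0
--     return [i // 2 if i >= 2 else 0 for i in A]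
-- ===== Notes on version B (the rewrite author's own statement) =====
-- stated objective: faster
-- what changed: Replaced the per-element triple loop (all pairs j<k<=i with an inner Euclid gcd) by the closed form floor(i/2) for i>=2 and 0 otherwise, attained by the pair (i//2, 2*(i//2)).
import Mathlib
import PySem

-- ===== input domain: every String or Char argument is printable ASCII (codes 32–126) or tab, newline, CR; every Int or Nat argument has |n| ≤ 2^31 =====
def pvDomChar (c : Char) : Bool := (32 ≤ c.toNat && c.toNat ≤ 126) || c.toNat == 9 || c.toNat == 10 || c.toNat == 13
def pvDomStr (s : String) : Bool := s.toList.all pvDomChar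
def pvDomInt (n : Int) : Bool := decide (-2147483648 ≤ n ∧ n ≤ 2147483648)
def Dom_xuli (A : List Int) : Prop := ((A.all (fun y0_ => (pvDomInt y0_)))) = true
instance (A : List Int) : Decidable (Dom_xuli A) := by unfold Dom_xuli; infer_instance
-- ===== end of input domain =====

-- B replaces A's per-element triple loop over all pairs with the closed form floor(i/2) for i ≥ 2, else 0 (asymptotically faster).


-- ===== PORT A =====
-- Python GCD(a,b): while b > 0: a, b = b, a % b; return a
def pyGCD (a b : Int) : Int :=
  if h : 0 < b then pyGCD b (PySem.Int.mod a b) else a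
termination_by b.toNat
decreasing_by
  have h1 : PySem.Int.mod a b = a % b := PySem.Int.mod_eq_emod_of_pos h
  have h2 : 0 ≤ a % b := Int.emod_nonneg a (by omega)
  have h3 : a % b < b := Int.emod_lt_of_pos a h
  omega

def xuli (A : List Int) : List Int :=
  A.foldl (fun B i =>
    B ++ [(PySem.List.pyRange 1 i 1).foldl (fun h j =>
            (PySem.List.pyRange (j+1) (i+1) 1).foldl (fun h k => max h (pyGCD j k)) h) 0]) []

-- ===== PORT B =====
def xuli_alt (A : List Int) : List Int :=
  A.map (fun i => if i ≥ 2 then PySem.Int.floordiv i 2 else 0)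

-- ===== PRECONDITION & SPEC =====
def Spec_xuli (A : List Int) (out : List Int) : Prop := out = xuli_alt A
instance (A : List Int) (out : List Int) : Decidable (Spec_xuli A out) := by unfold Spec_xuli; infer_instance

-- ===== CLAIM (what is proved, stated in full; the proofs are below) =====
def Claim_equal_xuli : Prop := ∀ (A : List Int), Dom_xuli A → Spec_xuli A (xuli A)

-- ===== LEMMAS AND PROOFS =====

-- generic fold bounds
theorem pv_foldl_le (g : Int → Int → Int) (c : Int) :
    ∀ (l : List Int) (init : Int), init ≤ c → (∀ acc x, x ∈ l → acc ≤ c → g acc x ≤ c) →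
      l.foldl g init ≤ c := by
  intro l
  induction l with
  | nil => intro init h _; simpa using h
  | cons x t ih =>
      intro init h hs
      simp only [List.foldl_cons]
      exact ih (g init x) (hs init x (by simp) h)
        (fun acc y hy hacc => hs acc y (by simp [hy]) hacc)

theorem pv_le_foldl (g : Int → Int → Int) (hmono : ∀ acc x, acc ≤ g acc x) :
    ∀ (l : List Int) (init : Int), init ≤ l.foldl g init := by
  intro l
  induction l with
  | nil => intro init; simp
  | cons x t ih =>
      intro init
      simp only [List.foldl_cons]
      exact le_trans (hmono init x) (ih (g init x))

theorem pv_foldl_ge_at (g : Int → Int → Int) (hmono : ∀ acc x, acc ≤ g acc x)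
    (v x0 : Int) (hx : ∀ acc, v ≤ g acc x0) :
    ∀ (l : List Int), x0 ∈ l → ∀ init, v ≤ l.foldl g init := by
  intro l
  induction l with
  | nil => intro h; simp at h
  | cons x t ih =>
      intro hmem init
      simp only [List.foldl_cons]
      rcases List.mem_cons.mp hmem with h | h
      · exact le_trans (h ▸ hx init) (pv_le_foldl g hmono t (g init x))
      · exact ih h (g init x)

-- pyGCD computes Int.gcd on nonnegative inputs
theorem pyGCD_eq_gcd_aux : ∀ (n : Nat) (b : Int), b.toNat ≤ n → 0 ≤ b → ∀ (a : Int), 0 ≤ a →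
    pyGCD a b = (Int.gcd a b : Int) := by
  intro n
  induction n with
  | zero =>
      intro b hbn hb a ha
      have hb0 : b = 0 := by omega
      subst hb0
      rw [pyGCD]
      simp [Int.gcd, Int.natAbs_of_nonneg ha]
  | succ n ih =>
      intro b hbn hb a ha
      rw [pyGCD]
      by_cases h : 0 < b
      · simp only [h, dif_pos]
        have hmod : PySem.Int.mod a b = a % b := PySem.Int.mod_eq_emod_of_pos h
        have h2 : 0 ≤ a % b := Int.emod_nonneg a (by omega)
        have h3 : a % b < b := Int.emod_lt_of_pos a h
        rw [hmod, ih (a % b) (by omega) h2 b (le_of_lt h)]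
        rw [Int.gcd_comm b (a % b), Int.gcd_emod a b]
      · simp only [h, dif_neg, not_false_iff]
        have hb0 : b = 0 := by omega
        subst hb0
        simp [Int.gcd, Int.natAbs_of_nonneg ha]

theorem pyGCD_eq_gcd (b : Int) (hb : 0 ≤ b) (a : Int) (ha : 0 ≤ a) :
    pyGCD a b = (Int.gcd a b : Int) :=
  pyGCD_eq_gcd_aux b.toNat b le_rfl hb a ha

-- every pair (j,k) with 1 ≤ j < k ≤ i has gcd ≤ i / 2
theorem pv_gcd_le (i j k : Int) (hj : 1 ≤ j) (hjk : j < k) (hk : k ≤ i) :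
    (Int.gcd j k : Int) ≤ i / 2 := by
  have hdj : (Int.gcd j k : Int) ∣ j := Int.gcd_dvd_left j k
  have hdk : (Int.gcd j k : Int) ∣ k := Int.gcd_dvd_right j k
  have hdd : (Int.gcd j k : Int) ∣ (k - j) := Dvd.dvd.sub hdk hdj
  have hdpos : 0 < (Int.gcd j k : Int) := by
    have : Int.gcd j k ≠ 0 := by
      intro h
      have := Int.gcd_eq_zero_iff.mp h
      omega
    exact_mod_cast Nat.pos_of_ne_zero this
  have h1 : (Int.gcd j k : Int) ≤ j := Int.le_of_dvd (by omega) hdj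
  have h2 : (Int.gcd j k : Int) ≤ k - j := Int.le_of_dvd (by omega) hdd
  have h3 : (Int.gcd j k : Int) * 2 ≤ k := by omega
  have h4 : (Int.gcd j k : Int) ≤ k / 2 := Int.le_ediv_iff_mul_le (by omega) |>.mpr h3
  calc (Int.gcd j k : Int) ≤ k / 2 := h4
    _ ≤ i / 2 := Int.ediv_le_ediv (by omega) hk

theorem pv_gcd_self_double (m : Int) (hm : 0 ≤ m) : (Int.gcd m (2 * m) : Int) = m := by
  have : Int.gcd m (2 * m) = m.natAbs := by
    have : (m : Int) ∣ (2 * m) := ⟨2, by ring⟩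
    simpa [Int.gcd] using Nat.gcd_eq_left (Int.natAbs_dvd_natAbs.mpr this)
  rw [this, Int.natAbs_of_nonneg hm]

-- the per-element double loop equals the closed form
theorem pv_inner (i : Int) :
    (PySem.List.pyRange 1 i 1).foldl (fun h j =>
        (PySem.List.pyRange (j+1) (i+1) 1).foldl (fun h k => max h (pyGCD j k)) h) 0
      = if i ≥ 2 then PySem.Int.floordiv i 2 else 0 := by
  by_cases hi : i ≥ 2
  · rw [if_pos hi, PySem.Int.floordiv_eq_ediv_of_pos (by omega)]
    have hgcd : ∀ j k : Int, 1 ≤ j → j < k → pyGCD j k = (Int.gcd j k : Int) := by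
      intro j k hj hjk
      exact pyGCD_eq_gcd k (by omega) j (by omega)
    apply le_antisymm
    · -- upper bound
      apply pv_foldl_le _ _ _ _ (by positivity)
      intro acc j hjmem hacc
      rw [PySem.List.mem_pyRange_one] at hjmem
      apply pv_foldl_le _ _ _ _ hacc
      intro acc2 k hkmem hacc2
      rw [PySem.List.mem_pyRange_one] at hkmem
      have hjk : j < k := by omega
      rw [hgcd j k (by omega) hjk]
      exact max_le hacc2 (pv_gcd_le i j k (by omega) hjk (by omega))
    · -- attained at (i/2, 2*(i/2))
      have hdiv : 2 * (i / 2) ≤ i := by omega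
      have hdivpos : 1 ≤ i / 2 := by omega
      apply pv_foldl_ge_at _ _ _ (i / 2) _ _ _
      · intro acc j
        exact pv_le_foldl _ (fun a k => le_max_left a _) _ acc
      · intro acc
        apply pv_foldl_ge_at _ (fun a k => le_max_left a _) _ (2 * (i / 2)) _ _ _
        · intro acc2
          have : pyGCD (i / 2) (2 * (i / 2)) = i / 2 := by
            rw [hgcd (i / 2) (2 * (i / 2)) hdivpos (by omega),
              pv_gcd_self_double (i / 2) (by omega)]
          rw [this]
          exact le_max_right _ _
        · rw [PySem.List.mem_pyRange_one]
          omega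
      · rw [PySem.List.mem_pyRange_one]
        omega
  · rw [if_neg hi]
    have : PySem.List.pyRange 1 i 1 = [] := PySem.List.pyRange_one_eq_nil (by omega)
    simp [this]

-- ===== VERDICT (by name: the statement is the Claim_ definition above) =====
theorem xuli_spec : Claim_equal_xuli := by
  intro A _
  unfold Spec_xuli xuli xuli_alt
  rw [PySem.List.foldl_append_singleton_eq_map]
  exact List.map_congr_left (fun i _ => pv_inner i)
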